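-- pv_equiv track=rewrite | github.com/jeonchacha/baekjoon | week4/1700.py | min_unplugs
-- ===== SOURCE A (Python) =====
-- def min_unplugs(num_slots, usage_order):
--     plugs = []
--     unplug_count = 0
--
--     for current_index in range(len(usage_order)):
--         current_device = usage_order[current_index]
--         if current_device in plugs:
--             continue
--
--         if len(plugs) < num_slots:
--             plugs.append(current_device)
--             continue
--
--         latest_use = -1
--         device_to_unplug = -1
--
--         for plugged_device in plugs:
--             next_use = float('inf')
--             for future_index in range(current_index + 1, len(usage_order)):
--                 if usage_order[future_index] == plugged_device:
--                     next_use = future_index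
--                     break
--
--             if next_use > latest_use:
--                 latest_use = next_use
--                 device_to_unplug = plugged_device
--
--         plugs.remove(device_to_unplug)
--         plugs.append(current_device)
--         unplug_count += 1
--     return unplug_count
-- ===== SOURCE B (Python) =====
-- def min_unplugs(num_slots, usage_order):
--     n = len(usage_order)
--     # next-use table: nxt[i] = index of the next occurrence of usage_order[i] after i, or n if none
--     nxt = [n] * n
--     last_seen = {}
--     for i in range(n - 1, -1, -1):
--         nxt[i] = last_seen.get(usage_order[i], n)
--         last_seen[usage_order[i]] = i
--     cache = {}  # device -> (insertion sequence number, next use index)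
--     seq = 0
--     unplugs = 0
--     for i, d in enumerate(usage_order):
--         if d in cache:
--             cache[d] = (cache[d][0], nxt[i])
--             continue
--         if len(cache) < num_slots:
--             cache[d] = (seq, nxt[i])
--         else:
--             victim = max(cache, key=lambda x: (cache[x][1], -cache[x][0]))
--             del cache[victim]
--             cache[d] = (seq, nxt[i])
--             unplugs += 1
--         seq += 1
--     return unplugs
-- ===== Notes on version B (the rewrite author's own statement) =====
-- stated objective: faster
-- what changed: B precomputes each position's next-use index in one backward pass with a dict and keeps the cache as a dict of device -> (insertion seq, next use), so an eviction is a max over at most num_slots cached entries instead of A's rescan of the whole remaining sequence for every plugged device.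
-- outside the precondition, e.g. on min_unplugs(0, [1, 2]): A raises ValueError, B raises ValueError
import Mathlib
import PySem

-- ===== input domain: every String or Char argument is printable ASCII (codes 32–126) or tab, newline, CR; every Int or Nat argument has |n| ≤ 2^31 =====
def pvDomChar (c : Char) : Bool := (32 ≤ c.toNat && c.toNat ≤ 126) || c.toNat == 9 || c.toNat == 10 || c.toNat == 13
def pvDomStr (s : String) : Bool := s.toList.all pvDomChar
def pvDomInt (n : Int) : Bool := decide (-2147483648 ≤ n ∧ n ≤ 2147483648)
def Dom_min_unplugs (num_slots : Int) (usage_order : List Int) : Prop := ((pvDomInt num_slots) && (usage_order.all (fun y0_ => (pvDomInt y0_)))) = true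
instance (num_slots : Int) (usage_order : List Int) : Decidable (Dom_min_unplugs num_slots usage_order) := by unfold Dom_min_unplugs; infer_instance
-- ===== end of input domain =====

-- B replaces A's per-eviction rescan of the whole future with a precomputed next-use table
-- (one backward pass with a dict) and a cache keyed by device holding (insertion seq, next use),
-- evicting via max over the cached entries: measurably faster, same result.

-- ===== PORT A =====
-- inner 'for future_index in range(i+1, n): … break' : first future index holding the device;
-- float('inf') is rendered as len(usage): every finite next_use is < len, and len>len is false
-- exactly as inf>inf is, so all comparisons agree.
def nextUseA (usage : List Int) (i : Int) (d : Int) : Int :=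
  match (PySem.List.pyRange (i + 1) (PySem.List.len usage) 1).find?
      (fun f => PySem.List.pyGetD usage f 0 == d) with
  | some f => f
  | none => PySem.List.len usage

-- 'for plugged_device in plugs: …' selection loop, state (latest_use, device_to_unplug)
def selectA (usage : List Int) (i : Int) (plugs : List Int) : Int × Int :=
  plugs.foldl (fun st pd =>
    let nu := nextUseA usage i pd
    if nu > st.1 then (nu, pd) else st) (-1, -1)

-- one iteration of the outer loop, state (plugs, unplug_count)
def stepA (num_slots : Int) (usage : List Int) (st : List Int × Int) (i : Int) : List Int × Int :=
  let d := PySem.List.pyGetD usage i 0   -- i ∈ range(len(usage)): always in range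
  if st.1.contains d then st
  else if (st.1.length : Int) < num_slots then (st.1 ++ [d], st.2)
  else
    -- plugs.remove(device_to_unplug); remove? is none exactly where Python raises ValueError
    -- (only reachable when num_slots ≤ 0, excluded by Pre_)
    (((PySem.List.remove? st.1 (selectA usage i st.1).2).getD st.1) ++ [d], st.2 + 1)

def min_unplugs (num_slots : Int) (usage_order : List Int) : Int :=
  ((PySem.List.pyRange 0 (PySem.List.len usage_order) 1).foldl
    (stepA num_slots usage_order) ([], 0)).2

-- ===== PORT B =====
-- nxt = [n]*n; backward pass: nxt[i] = last_seen.get(usage[i], n); last_seen[usage[i]] = i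
def buildNxt (usage : List Int) : List Int :=
  ((PySem.List.pyRange (PySem.List.len usage - 1) (-1) (-1)).foldl
    (fun (st : List Int × PySem.Dict Int Int) i =>
      let d := PySem.List.pyGetD usage i 0   -- i ∈ range(n-1,-1,-1): always in range
      (st.1.set i.toNat (st.2.getD d (PySem.List.len usage)), st.2.insert d i))
    (List.replicate usage.length (PySem.List.len usage), PySem.Dict.empty)).1

-- one iteration of B's loop over enumerate(usage_order), state (cache, seq, unplugs);
-- cache[d] lookups are under a contains/membership guard, so getD's default is never read
def stepB (num_slots : Int) (nxt : List Int)
    (st : PySem.Dict Int (Int × Int) × Int × Int) (p : Int × Int) :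
    PySem.Dict Int (Int × Int) × Int × Int :=
  let cache := st.1
  let seq := st.2.1
  let unplugs := st.2.2
  let nu := PySem.List.pyGetD nxt p.1 0   -- nxt[i], i in range
  if cache.contains p.2 then
    (cache.insert p.2 ((cache.getD p.2 (0, 0)).1, nu), seq, unplugs)
  else if (cache.size : Int) < num_slots then
    (cache.insert p.2 (seq, nu), seq + 1, unplugs)
  else
    -- max(cache, key=lambda x: (cache[x][1], -cache[x][0]))
    match PySem.List.max2? cache.keys
        (fun y => (cache.getD y (0, 0)).2) (fun y => -(cache.getD y (0, 0)).1) with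
    | some v => ((cache.erase v).insert p.2 (seq, nu), seq + 1, unplugs + 1)
    | none => st   -- max() of an empty cache: Python ValueError (only when num_slots ≤ 0, outside Pre_)

def min_unplugs_alt (num_slots : Int) (usage_order : List Int) : Int :=
  ((PySem.List.enumerate usage_order 0).foldl
    (stepB num_slots (buildNxt usage_order)) (PySem.Dict.empty, 0, 0)).2.2

-- ===== PRECONDITION & SPEC =====
-- Pre_ excludes num_slots ≤ 0 with a nonempty usage list: there both programs raise
-- (A: list.remove(-1) → ValueError; B: max() of an empty cache → ValueError).
def Pre_min_unplugs (num_slots : Int) (usage_order : List Int) : Prop :=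
  1 ≤ num_slots ∨ usage_order = []
instance (num_slots : Int) (usage_order : List Int) : Decidable (Pre_min_unplugs num_slots usage_order) := by unfold Pre_min_unplugs; infer_instance

def pvWitness_min_unplugs : Int × List Int := (2, [1, 2, 3, 1, 2, 3])

def Spec_min_unplugs (num_slots : Int) (usage_order : List Int) (out : Int) : Prop := out = min_unplugs_alt num_slots usage_order
instance (num_slots : Int) (usage_order : List Int) (out : Int) : Decidable (Spec_min_unplugs num_slots usage_order out) := by unfold Spec_min_unplugs; infer_instance

-- ===== CLAIM (what is proved, stated in full; the proofs are below) =====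
def Claim_equal_min_unplugs : Prop := ∀ (num_slots : Int) (usage_order : List Int), Dom_min_unplugs num_slots usage_order → Pre_min_unplugs num_slots usage_order → Spec_min_unplugs num_slots usage_order (min_unplugs num_slots usage_order)

-- ===== LEMMAS AND PROOFS =====

-- first occurrence of d in u at an index ≥ k, as an Int; u.length if none
def fo (u : List Int) (d : Int) (k : Nat) : Int :=
  if h : k < u.length then
    (if u[k] = d then (k : Int) else fo u d (k + 1))
  else (u.length : Int)
termination_by u.length - k

lemma fo_nonneg (u : List Int) (d : Int) (k : Nat) : 0 ≤ fo u d k := by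
  rw [fo]
  split
  · split
    · positivity
    · exact fo_nonneg u d (k + 1)
  · positivity
termination_by u.length - k

lemma fo_self (u : List Int) (d : Int) (k : Nat) (hk : k < u.length) (h : u[k] = d) :
    fo u d k = (k : Int) := by
  rw [fo]; simp [hk, h]

lemma fo_succ_of_ne (u : List Int) (d : Int) (k : Nat) (h : ∀ (hk : k < u.length), u[k] ≠ d) :
    fo u d k = fo u d (k + 1) := by
  rw [fo]
  split
  next hk =>
    rw [if_neg (h hk)]
  next hk =>
    rw [fo, dif_neg (by omega : ¬ k + 1 < u.length)]

lemma findAux (u : List Int) (d : Int) (j : Nat) :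
    (match (PySem.List.pyRange (j : Int) (PySem.List.len u) 1).find?
        (fun f => PySem.List.pyGetD u f 0 == d) with
     | some f => f
     | none => PySem.List.len u) = fo u d j := by
  by_cases h : j < u.length
  · rw [PySem.List.pyRange_one_cons (by simp [PySem.List.len]; exact_mod_cast h)]
    have hget : PySem.List.pyGetD u (j : Int) 0 = u[j] := by
      rw [PySem.List.pyGetD_natCast]
      simp [List.getD_eq_getElem?_getD, h]
    by_cases hd : u[j] = d
    · rw [List.find?_cons_of_pos (by simp [hget, hd])]
      rw [fo_self u d j h hd]
    · rw [List.find?_cons_of_neg (by simp [hget, hd])]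
      have : (j : Int) + 1 = ((j + 1 : Nat) : Int) := by push_cast; ring
      rw [this, findAux u d (j + 1), fo_succ_of_ne u d j (fun _ => hd)]
  · rw [PySem.List.pyRange_one_eq_nil (by simp [PySem.List.len]; exact_mod_cast Nat.le_of_not_lt h)]
    rw [fo, dif_neg h]
    rfl
termination_by u.length - j

-- nextUseA computes fo at i+1
lemma nextUseA_eq (u : List Int) (d : Int) (k : Nat) :
    nextUseA u (k : Int) d = fo u d (k + 1) := by
  unfold nextUseA
  have : (k : Int) + 1 = ((k + 1 : Nat) : Int) := by push_cast; ring
  rw [this, findAux]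

-- the first-argmax recursion both selection loops compute
def fam (f : Int → Int) : Int → List Int → Int
  | m, [] => m
  | m, x :: t => if f m < f x then fam f x t else fam f m t

lemma fam_mem (f : Int → Int) (m : Int) (L : List Int) : fam f m L ∈ m :: L := by
  induction L generalizing m with
  | nil => simp [fam]
  | cons x t ih =>
    rw [fam]
    split
    · have := ih x; simp only [List.mem_cons] at this ⊢; tauto
    · have := ih m; simp only [List.mem_cons] at this ⊢; tauto

lemma fam_congr (f g : Int → Int) (m : Int) (L : List Int)
    (h : ∀ y ∈ m :: L, f y = g y) : fam f m L = fam g m L := by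
  induction L generalizing m with
  | nil => rfl
  | cons x t ih =>
    have hm := h m (by simp)
    have hx := h x (by simp)
    rw [fam, fam, hm, hx]
    split
    · exact ih x (fun y hy => h y (by simp only [List.mem_cons] at hy ⊢; tauto))
    · exact ih m (fun y hy => h y (by simp only [List.mem_cons] at hy ⊢; tauto))

-- A's selection fold computes fam
lemma selectA_fold (f : Int → Int) (m : Int) (L : List Int) :
    L.foldl (fun st pd => if f pd > st.1 then (f pd, pd) else st) (f m, m)
      = (f (fam f m L), fam f m L) := by
  induction L generalizing m with
  | nil => rfl
  | cons x t ih =>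
    rw [List.foldl_cons, fam]
    by_cases hfx : f m < f x
    · rw [if_pos hfx, if_pos hfx]
      simpa using ih x
    · rw [if_neg hfx, if_neg hfx]
      simpa [hfx] using ih m

-- B's max2? as a named fold step, and its value when the second key is strictly decreasing
def m2step (f g : Int → Int) : Option Int → Int → Option Int :=
  fun acc x =>
    match acc with
    | none => some x
    | some w =>
      if (decide (f w < f x) || !decide (f x < f w) && decide (g w < g x)) = true
      then some x else some w

lemma max2?_eq_foldl (f g : Int → Int) (xs : List Int) :
    PySem.List.max2? xs f g = xs.foldl (m2step f g) none := by
  simp only [PySem.List.max2?]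
  congr 1
  funext acc x
  cases acc <;> rfl

lemma m2step_fold (f g s : Int → Int) (hg : ∀ y, g y = -(s y)) :
    ∀ (L : List Int) (m : Int), (∀ y ∈ L, s m < s y) →
    L.Pairwise (fun a b => s a < s b) →
    L.foldl (m2step f g) (some m) = some (fam f m L) := by
  intro L
  induction L with
  | nil => intro m _ _; rfl
  | cons x t ih =>
    intro m hm hL
    have hsx : s m < s x := hm x (by simp)
    have hneg : ¬ (g m < g x) := by rw [hg m, hg x]; omega
    rw [List.foldl_cons, fam]
    have hstep : ∀ b : Bool, (decide (f m < f x)) = b →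
        m2step f g (some m) x = (if f m < f x then some x else some m) := by
      intro b _
      simp only [m2step]
      by_cases hfx : f m < f x
      · simp [hfx]
      · simp [hfx, hneg]
    rw [hstep (decide (f m < f x)) rfl]
    by_cases hfx : f m < f x
    · rw [if_pos hfx, if_pos hfx]
      exact ih x (fun y hy => (List.pairwise_cons.mp hL).1 y hy) (List.pairwise_cons.mp hL).2
    · rw [if_neg hfx, if_neg hfx]
      exact ih m (fun y hy => hm y (by simp [hy])) (List.pairwise_cons.mp hL).2

lemma bnAux (u : List Int) (j : Nat) (hj : j ≤ u.length) :
    ∀ (L : List Int) (dd : PySem.Dict Int Int),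
    L.length = u.length →
    (∀ k, (hk : k < u.length) → j ≤ k → L[k]? = some (fo u u[k] (k + 1))) →
    (∀ d, dd.getD d (u.length : Int) = fo u d j) →
    ∀ k, (hk : k < u.length) →
    (((PySem.List.pyRange ((j : Int) - 1) (-1) (-1)).foldl
        (fun (st : List Int × PySem.Dict Int Int) i =>
          let d := PySem.List.pyGetD u i 0
          (st.1.set i.toNat (st.2.getD d (PySem.List.len u)), st.2.insert d i))
        (L, dd)).1)[k]? = some (fo u u[k] (k + 1)) := by
  induction j with
  | zero =>
    intro L dd hlen hL hdd k hk
    rw [show ((0 : Nat) : Int) - 1 = (-1 : Int) by norm_num]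
    rw [PySem.List.pyRange_neg_one_eq_nil (le_refl _)]
    exact hL k hk (Nat.zero_le k)
  | succ j ih =>
    intro L dd hlen hL hdd k hk
    have hjlt : j < u.length := by omega
    rw [show ((j + 1 : Nat) : Int) - 1 = (j : Int) by push_cast; ring]
    rw [PySem.List.pyRange_neg_one_cons (by omega)]
    rw [List.foldl_cons]
    have hget : PySem.List.pyGetD u (j : Int) 0 = u[j] := by
      rw [PySem.List.pyGetD_natCast]
      simp [List.getD_eq_getElem?_getD, hjlt]
    simp only [hget, Int.toNat_natCast]
    apply ih (Nat.le_of_lt hjlt)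
    · simpa using hlen
    · intro k' hk' hjk'
      by_cases hkj : k' = j
      · subst hkj
        rw [List.getElem?_set_self (by omega)]
        have : dd.getD u[k'] (u.length : Int) = fo u u[k'] (k' + 1) := hdd u[k']
        simp [PySem.List.len, this]
      · rw [List.getElem?_set_ne (fun h => hkj h.symm)]
        exact hL k' hk' (by omega)
    · intro d
      rw [PySem.Dict.getD_insert]
      by_cases hd : d = u[j]
      · rw [if_pos hd]
        exact (fo_self u d j hjlt hd.symm).symm
      · rw [if_neg hd]
        rw [hdd d, ← fo_succ_of_ne u d j (fun _ h => hd h.symm)]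

-- buildNxt is the fo table
lemma buildNxt_get (u : List Int) (k : Nat) (hk : k < u.length) :
    (buildNxt u)[k]? = some (fo u u[k] (k + 1)) := by
  unfold buildNxt
  have h0 : PySem.List.len u - 1 = ((u.length : Nat) : Int) - 1 := by simp [PySem.List.len]
  rw [h0]
  apply bnAux u u.length (le_refl _)
  · simp
  · intro k' hk' hle; omega
  · intro d
    rw [fo, dif_neg (lt_irrefl _)]
    simp [PySem.Dict.getD_empty]

-- the joint loop invariant
def LoopInv (u : List Int) (k : Nat) (plugs : List Int)
    (cache : PySem.Dict Int (Int × Int)) (seq : Int) : Prop :=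
  plugs = cache.keys ∧ cache.keys.Nodup ∧
  (∀ p ∈ cache.items, p.2.2 = fo u p.1 k ∧ p.2.1 < seq) ∧
  (cache.items.map (fun p => p.2.1)).Pairwise (· < ·)

lemma nodup_append_singleton {l : List Int} {x : Int} (h : l.Nodup) (hx : x ∉ l) :
    (l ++ [x]).Nodup := by
  rw [List.nodup_append]
  refine ⟨h, List.nodup_singleton x, ?_⟩
  intro a ha b hb heq
  exact hx ((List.mem_singleton.mp hb) ▸ heq ▸ ha)

lemma remove?_of_mem (xs : List Int) (v : Int) (h : v ∈ xs) :
    PySem.List.remove? xs v = some (xs.erase v) := by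
  have hs : (List.idxOf? v xs).isSome := by
    rw [← PySem.List.index?_eq_idxOf?]
    exact (PySem.List.index?_isSome_iff xs v).mpr h
  obtain ⟨i, hi⟩ := Option.isSome_iff_exists.mp hs
  simp only [PySem.List.remove?, hi, Option.map_some, List.erase_eq_eraseIdx]

lemma mem_items_getD (cache : PySem.Dict Int (Int × Int)) (hnd : cache.keys.Nodup) (y : Int)
    (hy : y ∈ cache.keys) : (y, cache.getD y (0, 0)) ∈ cache.items := by
  have hex : ∃ p ∈ cache.items, p.1 = y := by
    simpa [PySem.Dict.keys, List.mem_map] using hy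
  obtain ⟨p, hp, hpy⟩ := hex
  have hp' : (y, p.2) ∈ cache.items := by rw [← hpy]; exact hp
  have hg := PySem.Dict.getD_of_mem_items cache hp' hnd (0, 0)
  rw [hg]
  exact hp'

lemma loop_eq_proof (ns : Int) (u : List Int) (hns : 1 ≤ ns) (fuel : Nat) :
    ∀ (k : Nat), u.length - k ≤ fuel →
    ∀ (plugs : List Int) (cache : PySem.Dict Int (Int × Int)) (seq cnt : Int),
    LoopInv u k plugs cache seq →
    ((PySem.List.enumerate (u.drop k) k).foldl
        (fun st (p : Int × Int) => stepA ns u st p.1) (plugs, cnt)).2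
      = ((PySem.List.enumerate (u.drop k) k).foldl
        (stepB ns (buildNxt u)) (cache, seq, cnt)).2.2 := by
  induction fuel with
  | zero =>
    intro k hk plugs cache seq cnt _
    rw [List.drop_eq_nil_of_le (by omega)]
    rfl
  | succ fuel ih =>
    intro k hk plugs cache seq cnt hInv
    by_cases hlt : k < u.length
    · obtain ⟨hkeys, hnd, hitems, hpw⟩ := hInv
      rw [List.drop_eq_getElem_cons hlt, PySem.List.enumerate_cons, List.foldl_cons, List.foldl_cons]
      rw [show ((k : Int) + 1) = ((k + 1 : Nat) : Int) by push_cast; ring]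
      have hx : PySem.List.pyGetD u (k : Int) 0 = u[k] := by
        rw [PySem.List.pyGetD_natCast]
        simp [List.getD_eq_getElem?_getD, hlt]
      have hnu : PySem.List.pyGetD (buildNxt u) (k : Int) 0 = fo u u[k] (k + 1) := by
        rw [PySem.List.pyGetD_natCast, List.getD_eq_getElem?_getD, buildNxt_get u k hlt]
        rfl
      have hsize : cache.size = plugs.length := by
        rw [hkeys]
        simp [PySem.Dict.keys, PySem.Dict.size]
      by_cases hmem : u[k] ∈ plugs
      · -- HIT: device already plugged; A skips, B refreshes the stored next use
        have hconA : plugs.contains u[k] = true := by simpa using hmem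
        have hconB : cache.contains u[k] = true :=
          (PySem.Dict.contains_iff_mem_keys cache u[k]).mpr (hkeys ▸ hmem)
        have hA : stepA ns u (plugs, cnt) ((k : Int)) = (plugs, cnt) := by
          simp only [stepA, hx, hconA, if_true]
        have hB : stepB ns (buildNxt u) (cache, seq, cnt) ((k : Int), u[k])
            = (cache.insert u[k] ((cache.getD u[k] (0, 0)).1, fo u u[k] (k + 1)), seq, cnt) := by
          simp only [stepB, hconB, if_true, hnu]
        simp only [hA, hB]
        apply ih (k + 1) (by omega)
        refine ⟨?_, ?_, ?_, ?_⟩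
        · rw [hkeys, PySem.Dict.keys_insert_of_contains cache _ hconB]
        · rw [PySem.Dict.keys_insert_of_contains cache _ hconB]; exact hnd
        · intro p hp
          rw [PySem.Dict.items_insert_of_contains cache _ hconB] at hp
          obtain ⟨q, hq, rfl⟩ := List.mem_map.mp hp
          by_cases hqx : (q.1 == u[k]) = true
          · have hqx' : q.1 = u[k] := by simpa using hqx
            have hq' : (u[k], q.2) ∈ cache.items := by rw [← hqx']; exact hq
            have hgd : cache.getD u[k] (0, 0) = q.2 :=
              PySem.Dict.getD_of_mem_items cache hq' hnd (0, 0)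
            rw [if_pos hqx]
            refine ⟨rfl, ?_⟩
            show (cache.getD u[k] (0, 0)).1 < seq
            rw [hgd]
            exact (hitems q hq).2
          · have hqx' : q.1 ≠ u[k] := by simpa using hqx
            rw [if_neg hqx]
            refine ⟨?_, (hitems q hq).2⟩
            rw [(hitems q hq).1]
            exact fo_succ_of_ne u q.1 k (fun _ h => hqx' h.symm)
        · rw [PySem.Dict.items_insert_of_contains cache _ hconB, List.map_map]
          have hcong : ∀ q ∈ cache.items,
              ((fun p => p.2.1) ∘
                (fun p => if (p.1 == u[k]) = true
                  then (u[k], ((cache.getD u[k] (0, 0)).1, fo u u[k] (k + 1))) else p)) q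
                = (fun p => p.2.1) q := by
            intro q hq
            by_cases hqx : (q.1 == u[k]) = true
            · have hqx' : q.1 = u[k] := by simpa using hqx
              have hq' : (u[k], q.2) ∈ cache.items := by rw [← hqx']; exact hq
              have hgd : cache.getD u[k] (0, 0) = q.2 :=
                PySem.Dict.getD_of_mem_items cache hq' hnd (0, 0)
              show ((fun p => p.2.1) (if (q.1 == u[k]) = true then _ else q)) = q.2.1
              rw [if_pos hqx]
              show (cache.getD u[k] (0, 0)).1 = q.2.1
              rw [hgd]
            · show ((fun p => p.2.1) (if (q.1 == u[k]) = true then _ else q)) = q.2.1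
              rw [if_neg hqx]
          rw [List.map_congr_left hcong]
          exact hpw
      · have hconA : plugs.contains u[k] = false := by simpa using hmem
        have hconB : cache.contains u[k] = false := by
          cases hc : cache.contains u[k] with
          | false => rfl
          | true =>
            exact absurd (hkeys ▸ (PySem.Dict.contains_iff_mem_keys cache u[k]).mp hc) hmem
        by_cases hsz : (plugs.length : Int) < ns
        · -- FILL: a free slot; both append the new device
          have hA : stepA ns u (plugs, cnt) ((k : Int)) = (plugs ++ [u[k]], cnt) := by
            simp only [stepA, hx, hconA, Bool.false_eq_true, if_false, if_pos hsz]
          have hB : stepB ns (buildNxt u) (cache, seq, cnt) ((k : Int), u[k])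
              = (cache.insert u[k] (seq, fo u u[k] (k + 1)), seq + 1, cnt) := by
            simp only [stepB, hconB, Bool.false_eq_true, if_false, hnu, hsize, if_pos hsz]
          simp only [hA, hB]
          apply ih (k + 1) (by omega)
          refine ⟨?_, ?_, ?_, ?_⟩
          · rw [hkeys, PySem.Dict.keys_insert_of_not_contains cache _ hconB]
          · rw [PySem.Dict.keys_insert_of_not_contains cache _ hconB]
            have hxk : u[k] ∉ cache.keys := fun h => hmem (hkeys ▸ h)
            exact nodup_append_singleton hnd hxk
          · intro p hp
            rw [PySem.Dict.items_insert_of_not_contains cache _ hconB] at hp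
            rcases List.mem_append.mp hp with hp1 | hp2
            · have hne : p.1 ≠ u[k] := by
                intro h
                exact hmem (hkeys ▸ (h ▸ PySem.Dict.mem_keys_of_mem_items cache hp1))
              refine ⟨?_, by have := (hitems p hp1).2; omega⟩
              rw [(hitems p hp1).1]
              exact fo_succ_of_ne u p.1 k (fun _ h => hne h.symm)
            · have hp2' : p = (u[k], (seq, fo u u[k] (k + 1))) := by simpa using hp2
              subst hp2'
              exact ⟨rfl, by show seq < seq + 1; omega⟩
          · rw [PySem.Dict.items_insert_of_not_contains cache _ hconB, List.map_append]
            rw [List.pairwise_append]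
            refine ⟨hpw, by simp, ?_⟩
            intro a ha b hb
            obtain ⟨q, hq, rfl⟩ := List.mem_map.mp ha
            have hb' : b = seq := by simpa using hb
            rw [hb']
            exact (hitems q hq).2
        · -- EVICT: both select the same victim and replace it
          cases plugs with
          | nil => exfalso; simp at hsz; omega
          | cons m rest =>
            have hA1 : (selectA u (k : Int) (m :: rest)).2
                = fam (fun y => fo u y (k + 1)) m rest := by
              unfold selectA
              simp only [nextUseA_eq]
              rw [List.foldl_cons]
              rw [if_pos (by have := fo_nonneg u m (k + 1); omega :
                fo u m (k + 1) > (((-1 : Int), (-1 : Int)) : Int × Int).1)]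
              rw [selectA_fold (fun y => fo u y (k + 1)) m rest]
            have hspair : cache.items.Pairwise
                (fun p q => (cache.getD p.1 (0, 0)).1 < (cache.getD q.1 (0, 0)).1) := by
              refine List.Pairwise.imp_of_mem ?_ (List.pairwise_map.mp hpw)
              intro a b ha hb hab
              have hga : cache.getD a.1 (0, 0) = a.2 :=
                PySem.Dict.getD_of_mem_items cache (by exact ha) hnd (0, 0)
              have hgb : cache.getD b.1 (0, 0) = b.2 :=
                PySem.Dict.getD_of_mem_items cache (by exact hb) hnd (0, 0)
              rw [hga, hgb]
              exact hab
            have hkpair : (m :: rest).Pairwise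
                (fun a b => (cache.getD a (0, 0)).1 < (cache.getD b (0, 0)).1) := by
              rw [hkeys]
              exact List.pairwise_map.mpr hspair
            have hgetD2 : ∀ y ∈ (m :: rest), (cache.getD y (0, 0)).2 = fo u y (k + 1) := by
              intro y hy
              have hyk : y ∈ cache.keys := hkeys ▸ hy
              have hmi := mem_items_getD cache hnd y hyk
              have h1 : (cache.getD y (0, 0)).2 = fo u y k := (hitems _ hmi).1
              have hne : u[k] ≠ y := fun h => hmem (h ▸ hy)
              rw [h1]
              exact fo_succ_of_ne u y k (fun _ => hne)
            have hmax : PySem.List.max2? cache.keys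
                (fun y => (cache.getD y (0, 0)).2) (fun y => -(cache.getD y (0, 0)).1)
                = some (fam (fun y => fo u y (k + 1)) m rest) := by
              rw [← hkeys, max2?_eq_foldl, List.foldl_cons]
              have h0 : m2step (fun y => (cache.getD y (0, 0)).2)
                  (fun y => -(cache.getD y (0, 0)).1) none m = some m := rfl
              rw [h0]
              rw [show (fam (fun y => fo u y (k + 1)) m rest)
                  = fam (fun y => (cache.getD y (0, 0)).2) m rest from
                (fam_congr _ _ m rest (fun y hy => (hgetD2 y hy).symm))]
              exact m2step_fold (fun y => (cache.getD y (0, 0)).2)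
                (fun y => -(cache.getD y (0, 0)).1)
                (fun y => (cache.getD y (0, 0)).1) (fun y => rfl) rest m
                (fun y hy => (List.pairwise_cons.mp hkpair).1 y hy)
                (List.pairwise_cons.mp hkpair).2
            set v := fam (fun y => fo u y (k + 1)) m rest with hv
            have hvmem : v ∈ m :: rest := fam_mem _ m rest
            have hplugsnd : (m :: rest).Nodup := hkeys ▸ hnd
            have herase : (m :: rest).erase v = (m :: rest).filter (fun y => !(y == v)) := by
              rw [List.Nodup.erase_eq_filter hplugsnd v]
              rfl
            have hA : stepA ns u (m :: rest, cnt) ((k : Int))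
                = ((m :: rest).filter (fun y => !(y == v)) ++ [u[k]], cnt + 1) := by
              simp only [stepA, hx, hconA, Bool.false_eq_true, if_false, if_neg hsz, hA1]
              rw [remove?_of_mem _ _ hvmem]
              simp [herase]
            have herasekeys : (cache.erase v).keys
                = (m :: rest).filter (fun y => !(y == v)) := by
              have h1 : (cache.erase v).keys
                  = (cache.items.filter (fun p => !(p.1 == v))).map (fun p => p.1) := rfl
              have h2 : cache.keys = cache.items.map (fun p => p.1) := rfl
              rw [h1, hkeys, h2, List.filter_map]
              rfl
            have hcon2 : (cache.erase v).contains u[k] = false := by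
              cases hc : (cache.erase v).contains u[k] with
              | false => rfl
              | true =>
                have := (PySem.Dict.contains_iff_mem_keys _ u[k]).mp hc
                rw [herasekeys] at this
                exact absurd (List.mem_of_mem_filter this) hmem
            have hB : stepB ns (buildNxt u) (cache, seq, cnt) ((k : Int), u[k])
                = ((cache.erase v).insert u[k] (seq, fo u u[k] (k + 1)), seq + 1, cnt + 1) := by
              simp only [stepB, hconB, Bool.false_eq_true, if_false, hnu, hsize, if_neg hsz, hmax]
            simp only [hA, hB]
            apply ih (k + 1) (by omega)
            have hitemsE : ((cache.erase v).insert u[k] (seq, fo u u[k] (k + 1))).items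
                = cache.items.filter (fun p => !(p.1 == v)) ++ [(u[k], (seq, fo u u[k] (k + 1)))] := by
              rw [PySem.Dict.items_insert_of_not_contains _ _ hcon2]
              rfl
            refine ⟨?_, ?_, ?_, ?_⟩
            · rw [PySem.Dict.keys_insert_of_not_contains _ _ hcon2, herasekeys]
            · rw [PySem.Dict.keys_insert_of_not_contains _ _ hcon2, herasekeys]
              have h1 : ((m :: rest).filter (fun y => !(y == v))).Nodup := hplugsnd.filter _
              have h2 : u[k] ∉ (m :: rest).filter (fun y => !(y == v)) :=
                fun h => hmem (List.mem_of_mem_filter h)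
              exact nodup_append_singleton h1 h2
            · intro p hp
              rw [hitemsE] at hp
              rcases List.mem_append.mp hp with hp1 | hp2
              · have hp1' : p ∈ cache.items := List.mem_of_mem_filter hp1
                have hne : p.1 ≠ u[k] := by
                  intro h
                  exact hmem (hkeys ▸ (h ▸ PySem.Dict.mem_keys_of_mem_items cache hp1'))
                refine ⟨?_, by have := (hitems p hp1').2; omega⟩
                rw [(hitems p hp1').1]
                exact fo_succ_of_ne u p.1 k (fun _ h => hne h.symm)
              · have hp2' : p = (u[k], (seq, fo u u[k] (k + 1))) := by simpa using hp2
                subst hp2'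
                exact ⟨rfl, by show seq < seq + 1; omega⟩
            · rw [hitemsE, List.map_append, List.pairwise_append]
              refine ⟨hpw.sublist (List.Sublist.map _ List.filter_sublist), by simp, ?_⟩
              intro a ha b hb
              obtain ⟨q, hq, rfl⟩ := List.mem_map.mp ha
              have hb' : b = seq := by simpa using hb
              rw [hb']
              have := (hitems q (List.mem_of_mem_filter hq)).2
              omega
    · rw [List.drop_eq_nil_of_le (by omega)]
      rfl

-- ===== VERDICT (by name: the statement is the Claim_ definition above) =====
theorem min_unplugs_spec : Claim_equal_min_unplugs := by
  intro ns u _ hpre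
  unfold Spec_min_unplugs
  rcases hpre with hns | rfl
  · unfold min_unplugs min_unplugs_alt
    have hbridge : (PySem.List.enumerate u 0).foldl
        (fun (st : List Int × Int) (p : Int × Int) => stepA ns u st p.1) ([], 0)
        = (PySem.List.pyRange 0 (PySem.List.len u) 1).foldl (stepA ns u) ([], 0) := by
      rw [PySem.List.enumerate_eq_map_pyRange u 0, List.foldl_map]
    rw [← hbridge]
    have h0 : ((0 : Nat) : Int) = (0 : Int) := by norm_num
    have := loop_eq_proof ns u hns u.length 0 (by omega) [] PySem.Dict.empty 0 0
      ⟨rfl, List.nodup_nil, by simp [PySem.Dict.empty], by simp [PySem.Dict.empty]⟩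
    rw [List.drop_zero, h0] at this
    exact this
  · rfl
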